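-- pv_equiv track=rewrite | github.com/Chanuka-Ekanayake/AlgorithmLibrary | Library/Dynamic-Programming/coin-change/test-project/app.py | greedy_allocation
-- ===== SOURCE A (Python) =====
-- def greedy_allocation(bundles: list[int], target: int) -> list[int]:
--     """
--     A naive Greedy approach: Always pick the largest possible bundle first.
--     """
--     sorted_bundles = sorted(bundles, reverse=True)
--     allocation = []
--     remaining = target
--
--     for bundle in sorted_bundles:
--         while remaining >= bundle:
--             allocation.append(bundle)
--             remaining -= bundle
--
--     # If remaining > 0 at the end, the greedy approach failed to hit the exact target
--     return allocation if remaining == 0 else []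
-- ===== SOURCE B (Python) =====
-- def greedy_allocation(bundles: list[int], target: int) -> list[int]:
--     """
--     Greedy largest-first allocation; each bundle's count is computed in one
--     divmod step instead of repeated subtraction.
--     """
--     allocation = []
--     remaining = target
--     for bundle in sorted(bundles, reverse=True):
--         if bundle > 0 and remaining >= bundle:
--             count, remaining = divmod(remaining, bundle)
--             allocation += [bundle] * count
--     return allocation if remaining == 0 else []
-- ===== Notes on version B (the rewrite author's own statement) =====
-- stated objective: alternative
-- what changed: Replaces A's inner repeated-subtraction while-loop by a single divmod per bundle plus bulk list construction, guarded by 'bundle > 0' so non-positive bundles are skipped (A loops forever on those reachable cases, which Pre_ excludes).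
import Mathlib
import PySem

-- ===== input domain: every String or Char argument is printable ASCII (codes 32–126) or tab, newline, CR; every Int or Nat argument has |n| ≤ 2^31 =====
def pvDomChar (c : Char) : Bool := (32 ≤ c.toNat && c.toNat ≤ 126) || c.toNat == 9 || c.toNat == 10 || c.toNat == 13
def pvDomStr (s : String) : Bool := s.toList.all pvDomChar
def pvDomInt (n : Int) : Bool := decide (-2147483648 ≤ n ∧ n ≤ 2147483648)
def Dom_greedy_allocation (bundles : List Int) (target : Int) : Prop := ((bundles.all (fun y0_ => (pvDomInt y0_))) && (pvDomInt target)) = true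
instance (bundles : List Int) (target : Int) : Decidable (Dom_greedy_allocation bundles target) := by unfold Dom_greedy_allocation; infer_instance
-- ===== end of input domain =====

-- B replaces A's repeated-subtraction inner while-loop by one divmod per bundle;
-- equivalence is claimed on Pre_, exactly the inputs where A's while-loop terminates.

-- ===== PORT A =====
-- Inner 'while remaining >= bundle' loop. Fuel only makes the function total in Lean:
-- on Pre_ inputs the loop runs at most remaining.toNat times, so 'remaining.toNat + 1' fuel is exact.
def pvLoopA (bundle : Int) : Nat → Int → List Int → List Int × Int
  | 0, remaining, allocation => (allocation, remaining)
  | fuel + 1, remaining, allocation =>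
      if bundle ≤ remaining then
        pvLoopA bundle fuel (remaining - bundle) (allocation ++ [bundle])
      else (allocation, remaining)

def greedy_allocation (bundles : List Int) (target : Int) : List Int :=
  let sorted_bundles := PySem.List.sorted bundles (fun x => x) true
  let st := sorted_bundles.foldl
      (fun (st : List Int × Int) bundle => pvLoopA bundle (st.2.toNat + 1) st.2 st.1)
      ([], target)
  if st.2 = 0 then st.1 else []

-- ===== PORT B =====
-- divmod(remaining, bundle) ported as (floordiv, mod); exact since the guard gives bundle > 0.
def greedy_allocation_alt (bundles : List Int) (target : Int) : List Int :=
  let st := (PySem.List.sorted bundles (fun x => x) true).foldl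
      (fun (st : List Int × Int) bundle =>
        if 0 < bundle ∧ bundle ≤ st.2 then
          (st.1 ++ List.replicate (PySem.Int.floordiv st.2 bundle).toNat bundle,
           PySem.Int.mod st.2 bundle)
        else st)
      ([], target)
  if st.2 = 0 then st.1 else []

-- ===== PRECONDITION & SPEC =====
-- Pre_ excludes exactly the inputs on which A's inner while-loop runs forever (a bundle b ≤ 0 is
-- reached with remaining ≥ b): A returns no value there, so nothing A returns on is excluded.
def Pre_greedy_allocation (bundles : List Int) (target : Int) : Prop :=
  ∀ b ∈ bundles, 0 < b ∨ target < b
instance (bundles : List Int) (target : Int) : Decidable (Pre_greedy_allocation bundles target) := by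
  unfold Pre_greedy_allocation; infer_instance

def pvWitness_greedy_allocation : List Int × Int := ([3, 1], 7)

def Spec_greedy_allocation (bundles : List Int) (target : Int) (out : List Int) : Prop := out = greedy_allocation_alt bundles target
instance (bundles : List Int) (target : Int) (out : List Int) : Decidable (Spec_greedy_allocation bundles target out) := by unfold Spec_greedy_allocation; infer_instance

-- ===== CLAIM (what is proved, stated in full; the proofs are below) =====
def Claim_equal_greedy_allocation : Prop := ∀ (bundles : List Int) (target : Int), Dom_greedy_allocation bundles target → Pre_greedy_allocation bundles target → Spec_greedy_allocation bundles target (greedy_allocation bundles target)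

-- ===== LEMMAS AND PROOFS =====

-- For a positive bundle, A's subtraction loop computes floordiv/mod in one shot.
theorem pvLoopA_eq (bundle : Int) (hb : 0 < bundle) :
    ∀ (fuel : Nat) (r : Int), r ≤ (fuel : Int) → ∀ (acc : List Int),
      pvLoopA bundle fuel r acc =
        (if bundle ≤ r then acc ++ List.replicate (PySem.Int.floordiv r bundle).toNat bundle else acc,
         if bundle ≤ r then PySem.Int.mod r bundle else r) := by
  intro fuel
  induction fuel with
  | zero =>
      intro r hr acc
      have : ¬ bundle ≤ r := by omega
      simp [pvLoopA, this]
  | succ n ih =>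
      intro r hr acc
      by_cases h : bundle ≤ r
      · have hdiv : PySem.Int.floordiv r bundle = PySem.Int.floordiv (r - bundle) bundle + 1 := by
          rw [PySem.Int.floordiv_eq_ediv_of_pos hb, PySem.Int.floordiv_eq_ediv_of_pos hb]
          have := Int.add_mul_ediv_right (r - bundle) 1 (by omega : bundle ≠ 0)
          have h2 : r - bundle + 1 * bundle = r := by ring
          rw [h2] at this
          omega
        have hmod : PySem.Int.mod r bundle = PySem.Int.mod (r - bundle) bundle := by
          rw [PySem.Int.mod_eq_emod_of_pos hb, PySem.Int.mod_eq_emod_of_pos hb]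
          exact (Int.sub_emod_right r bundle).symm
        have hnn : 0 ≤ PySem.Int.floordiv (r - bundle) bundle := by
          rw [PySem.Int.floordiv_eq_ediv_of_pos hb]
          exact Int.ediv_nonneg (by omega) (by omega)
        have hrec := ih (r - bundle) (by omega) (acc ++ [bundle])
        by_cases h2 : bundle ≤ r - bundle
        · simp only [pvLoopA, if_pos h, hrec, if_pos h2, Prod.mk.injEq]
          constructor
          · have : (PySem.Int.floordiv r bundle).toNat
                = (PySem.Int.floordiv (r - bundle) bundle).toNat + 1 := by omega
            rw [this, List.replicate_succ, List.append_assoc]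
            rfl
          · omega
        · -- last iteration: 0 ≤ r - bundle < bundle
          have hd0 : PySem.Int.floordiv (r - bundle) bundle = 0 := by
            rw [PySem.Int.floordiv_eq_ediv_of_pos hb]
            exact Int.ediv_eq_zero_of_lt (by omega) (by omega)
          have hm0 : PySem.Int.mod (r - bundle) bundle = r - bundle := by
            rw [PySem.Int.mod_eq_emod_of_pos hb]
            exact Int.emod_eq_of_lt (by omega) (by omega)
          simp only [pvLoopA, if_pos h, hrec, if_neg h2, Prod.mk.injEq]
          constructor
          · have : (PySem.Int.floordiv r bundle).toNat = 1 := by omega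
            simp [this]
          · omega
      · simp [pvLoopA, h]

-- all-positive case: the two folds agree step for step
theorem pv_fold_eq_pos (l : List Int) (hpos : ∀ b ∈ l, 0 < b) :
    ∀ (st : List Int × Int),
      l.foldl (fun (st : List Int × Int) bundle => pvLoopA bundle (st.2.toNat + 1) st.2 st.1) st
      = l.foldl (fun (st : List Int × Int) bundle =>
          if 0 < bundle ∧ bundle ≤ st.2 then
            (st.1 ++ List.replicate (PySem.Int.floordiv st.2 bundle).toNat bundle,
             PySem.Int.mod st.2 bundle)
          else st) st := by
  induction l with
  | nil => intro st; rfl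
  | cons b t ih =>
      intro st
      have hb : 0 < b := hpos b (by simp)
      have hstep : pvLoopA b (st.2.toNat + 1) st.2 st.1
          = if 0 < b ∧ b ≤ st.2 then
              (st.1 ++ List.replicate (PySem.Int.floordiv st.2 b).toNat b,
               PySem.Int.mod st.2 b)
            else st := by
        rw [pvLoopA_eq b hb (st.2.toNat + 1) st.2 (by omega) st.1]
        by_cases h : b ≤ st.2
        · simp [h, hb]
        · simp [h]
      simp only [List.foldl_cons, hstep]
      exact ih (fun x hx => hpos x (by simp [hx])) _
-- both folds leave the state unchanged when every bundle exceeds the remaining target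
theorem pv_fold_skip_A (r : Int) (acc : List Int) :
    ∀ (l : List Int), (∀ b ∈ l, r < b) →
      l.foldl (fun (st : List Int × Int) bundle => pvLoopA bundle (st.2.toNat + 1) st.2 st.1) (acc, r)
      = (acc, r) := by
  intro l
  induction l with
  | nil => intro _; rfl
  | cons b t ih =>
      intro h
      have hb : ¬ b ≤ r := by have := h b (by simp); omega
      simp only [List.foldl_cons, pvLoopA, if_neg hb]
      exact ih (fun x hx => h x (by simp [hx]))

theorem pv_fold_skip_B (r : Int) (acc : List Int) :
    ∀ (l : List Int), (∀ b ∈ l, r < b) →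
      l.foldl (fun (st : List Int × Int) bundle =>
          if 0 < bundle ∧ bundle ≤ st.2 then
            (st.1 ++ List.replicate (PySem.Int.floordiv st.2 bundle).toNat bundle,
             PySem.Int.mod st.2 bundle)
          else st) (acc, r)
      = (acc, r) := by
  intro l
  induction l with
  | nil => intro _; rfl
  | cons b t ih =>
      intro h
      have hb : ¬ (0 < b ∧ b ≤ r) := by have := h b (by simp); omega
      simp only [List.foldl_cons, if_neg hb]
      exact ih (fun x hx => h x (by simp [hx]))

-- ===== VERDICT (by name: the statement is the Claim_ definition above) =====
theorem greedy_allocation_spec : Claim_equal_greedy_allocation := by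
  intro bundles target _ hpre
  unfold Spec_greedy_allocation greedy_allocation greedy_allocation_alt
  by_cases hall : ∀ b ∈ bundles, 0 < b
  · have : ∀ b ∈ PySem.List.sorted bundles (fun x => x) true, 0 < b := by
      intro b hb
      exact hall b ((PySem.List.mem_sorted bundles (fun x => x) true b).mp hb)
    simp only [pv_fold_eq_pos _ this]
  · push Not at hall
    obtain ⟨b0, hb0mem, hb0⟩ := hall
    have htneg : target < 0 := by
      rcases hpre b0 hb0mem with h | h
      · omega
      · omega
    have hskip : ∀ b ∈ PySem.List.sorted bundles (fun x => x) true, target < b := by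
      intro b hb
      have hmem := (PySem.List.mem_sorted bundles (fun x => x) true b).mp hb
      rcases hpre b hmem with h | h
      · omega
      · exact h
    simp only [pv_fold_skip_A target [] _ hskip, pv_fold_skip_B target [] _ hskip]
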